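-- pv_equiv track=rewrite | github.com/Ov3r1d3/hackerRank | Migratory Birds/main.py | migratoryBirds
-- ===== SOURCE A (Python) =====
-- import collections
--
-- def migratoryBirds(arr):
--     collection = collections.Counter(arr)
--     maxSum = -1
--     maxBird = -1
--     for bird in collection:
--         if collection[bird] > maxSum:
--             maxSum = collection[bird]
--             maxBird = bird
--         elif collection[bird] == maxSum:
--             if bird < maxBird:
--                 maxSum = collection[bird]
--                 maxBird = bird
--     return maxBird
-- ===== SOURCE B (Python) =====
-- def migratoryBirds(arr):
--     best, bestCnt = -1, 0
--     prev, run = None, 0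
--     for x in sorted(arr):
--         run = run + 1 if x == prev else 1
--         prev = x
--         if run > bestCnt:
--             bestCnt, best = run, x
--     return best
-- ===== Notes on version B (the rewrite author's own statement) =====
-- stated objective: alternative
-- what changed: B drops the Counter entirely: it sorts the list and does one run-length scan over the sorted list, keeping the first (hence smallest) value whose run strictly beats the best so far.
import Mathlib
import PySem

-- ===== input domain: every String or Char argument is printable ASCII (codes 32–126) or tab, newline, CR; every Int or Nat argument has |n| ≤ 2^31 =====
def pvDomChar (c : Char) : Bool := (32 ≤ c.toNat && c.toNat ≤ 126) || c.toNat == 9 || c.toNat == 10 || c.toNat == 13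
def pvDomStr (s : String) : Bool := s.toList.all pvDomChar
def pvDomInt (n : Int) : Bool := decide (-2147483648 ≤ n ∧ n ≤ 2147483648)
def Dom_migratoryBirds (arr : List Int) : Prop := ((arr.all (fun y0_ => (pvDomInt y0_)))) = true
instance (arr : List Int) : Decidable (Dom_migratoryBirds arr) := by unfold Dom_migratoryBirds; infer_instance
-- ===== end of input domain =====

-- B drops the Counter: it sorts the list and does one run-length scan over the sorted
-- list, keeping the first (smallest) value whose run strictly beats the best so far.


-- ===== PORT A =====
def migratoryBirds (arr : List Int) : Int :=
  let collection := PySem.Dict.counter arr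
  (collection.keys.foldl
    (fun (st : Int × Int) bird =>
      if collection.getD bird 0 > st.1 then (collection.getD bird 0, bird)
      else if collection.getD bird 0 == st.1 then
        (if bird < st.2 then (collection.getD bird 0, bird) else st)
      else st)
    (-1, -1)).2

-- ===== PORT B =====
-- B's loop body: state is (prev, run, best, bestCnt)
def pvStepB (st : Option Int × Int × Int × Int) (x : Int) : Option Int × Int × Int × Int :=
  let run := if st.1 == some x then st.2.1 + 1 else 1
  if run > st.2.2.2 then (some x, run, x, run) else (some x, run, st.2.2.1, st.2.2.2)

def migratoryBirds_alt (arr : List Int) : Int :=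
  ((PySem.List.sorted arr (fun x => x) false).foldl pvStepB (none, 0, -1, 0)).2.2.1

-- ===== PRECONDITION & SPEC =====
def Spec_migratoryBirds (arr : List Int) (out : Int) : Prop := out = migratoryBirds_alt arr
instance (arr : List Int) (out : Int) : Decidable (Spec_migratoryBirds arr out) := by unfold Spec_migratoryBirds; infer_instance

-- ===== CLAIM (what is proved, stated in full; the proofs are below) =====
def Claim_equal_migratoryBirds : Prop := ∀ (arr : List Int), Dom_migratoryBirds arr → Spec_migratoryBirds arr (migratoryBirds arr)

-- ===== LEMMAS AND PROOFS =====

-- A's loop body, abstracted over the count function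
def pvStep (cnt : Int → Int) (st : Int × Int) (bird : Int) : Int × Int :=
  if cnt bird > st.1 then (cnt bird, bird)
  else if cnt bird == st.1 then (if bird < st.2 then (cnt bird, bird) else st)
  else st

-- Invariant of A's fold: it ends at (max count, least key achieving it)
theorem pvGood (cnt : Int → Int) (hc : ∀ k, 0 ≤ cnt k) :
    ∀ (L : List Int), L ≠ [] →
      (∀ k ∈ L, cnt k ≤ (L.foldl (pvStep cnt) (-1, -1)).1) ∧
      (L.foldl (pvStep cnt) (-1, -1)).2 ∈ L ∧
      cnt (L.foldl (pvStep cnt) (-1, -1)).2 = (L.foldl (pvStep cnt) (-1, -1)).1 ∧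
      (∀ k ∈ L, cnt k = (L.foldl (pvStep cnt) (-1, -1)).1 → (L.foldl (pvStep cnt) (-1, -1)).2 ≤ k) := by
  intro L
  induction L using List.reverseRecOn with
  | nil => intro h; exact absurd rfl h
  | append_singleton M x ih =>
    intro _
    rw [List.foldl_append]
    by_cases hM : M = []
    · subst hM
      have h0 : cnt x > (-1 : Int) := lt_of_lt_of_le (by norm_num) (hc x)
      have hs : pvStep cnt (-1, -1) x = (cnt x, x) := by
        unfold pvStep; rw [if_pos h0]
      simp only [List.foldl_nil, List.foldl_cons, hs]
      refine ⟨?_, by simp, by simp, ?_⟩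
      · intro k hk
        have : k = x := by simpa using hk
        subst this; exact le_refl _
      · intro k hk _
        have : k = x := by simpa using hk
        subst this; exact le_refl _
    · obtain ⟨hmax, hmem, hcnt, hmin⟩ := ih hM
      set r := M.foldl (pvStep cnt) (-1, -1) with hr
      simp only [List.foldl_cons, List.foldl_nil]
      by_cases h1 : cnt x > r.1
      · have hs : pvStep cnt r x = (cnt x, x) := by
          unfold pvStep; rw [if_pos h1]
        rw [hs]
        refine ⟨?_, by simp, rfl, ?_⟩
        · intro k hk
          rcases List.mem_append.mp hk with h | h
          · exact le_of_lt (lt_of_le_of_lt (hmax k h) h1)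
          · have : k = x := by simpa using h
            subst this; exact le_refl _
        · intro k hk he
          rcases List.mem_append.mp hk with h | h
          · exact absurd he (ne_of_lt (lt_of_le_of_lt (hmax k h) h1))
          · have : k = x := by simpa using h
            subst this; exact le_refl _
      · by_cases h2 : cnt x = r.1
        · by_cases h3 : x < r.2
          · have hs : pvStep cnt r x = (cnt x, x) := by
              unfold pvStep; rw [if_neg h1, if_pos (by simp [h2]), if_pos h3]
            rw [hs]
            refine ⟨?_, by simp, rfl, ?_⟩
            · intro k hk
              rcases List.mem_append.mp hk with h | h
              · rw [h2]; exact hmax k h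
              · have : k = x := by simpa using h
                subst this; exact le_refl _
            · intro k hk he
              rcases List.mem_append.mp hk with h | h
              · exact le_of_lt (lt_of_lt_of_le h3 (hmin k h (by rw [← h2]; exact he)))
              · have : k = x := by simpa using h
                subst this; exact le_refl _
          · have hs : pvStep cnt r x = r := by
              unfold pvStep; rw [if_neg h1, if_pos (by simp [h2]), if_neg h3]
            rw [hs]
            refine ⟨?_, List.mem_append_left _ hmem, hcnt, ?_⟩
            · intro k hk
              rcases List.mem_append.mp hk with h | h
              · exact hmax k h
              · have : k = x := by simpa using h
                subst this; exact le_of_eq h2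
            · intro k hk he
              rcases List.mem_append.mp hk with h | h
              · exact hmin k h he
              · have : k = x := by simpa using h
                subst this; omega
        · have hlt : cnt x < r.1 := lt_of_le_of_ne (not_lt.mp h1) h2
          have hs : pvStep cnt r x = r := by
            unfold pvStep; rw [if_neg h1, if_neg (by simp [h2])]
          rw [hs]
          refine ⟨?_, List.mem_append_left _ hmem, hcnt, ?_⟩
          · intro k hk
            rcases List.mem_append.mp hk with h | h
            · exact hmax k h
            · have : k = x := by simpa using h
              subst this; exact le_of_lt hlt
          · intro k hk he
            rcases List.mem_append.mp hk with h | h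
            · exact hmin k h he
            · have : k = x := by simpa using h
              subst this; omega

-- Invariant of B's fold over a sorted list: run tracks the count of the last element,
-- and (best, bestCnt) is the least element achieving the maximal count.
theorem pvGoodB :
    ∀ (P : List Int), P.Pairwise (· ≤ ·) → P ≠ [] →
      let st := P.foldl pvStepB (none, 0, -1, 0)
      ∃ p, P.getLast? = some p ∧ st.1 = some p ∧ st.2.1 = (P.count p : Int) ∧
        1 ≤ st.2.2.2 ∧
        st.2.2.1 ∈ P ∧ (P.count st.2.2.1 : Int) = st.2.2.2 ∧
        (∀ k ∈ P, (P.count k : Int) ≤ st.2.2.2) ∧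
        (∀ k ∈ P, (P.count k : Int) = st.2.2.2 → st.2.2.1 ≤ k) := by
  intro P
  induction P using List.reverseRecOn with
  | nil => intro _ h; exact absurd rfl h
  | append_singleton M x ih =>
    intro hpw _
    have hpw' : M.Pairwise (· ≤ ·) ∧ ∀ a ∈ M, a ≤ x := by
      rw [List.pairwise_append] at hpw
      exact ⟨hpw.1, fun a ha => hpw.2.2 a ha x (by simp)⟩
    rw [List.foldl_append]
    by_cases hM : M = []
    · subst hM
      refine ⟨x, by simp, ?_⟩
      simp [pvStepB, List.count_singleton]
    · obtain ⟨p, hlast, hprev, hrun, hbc1, hbmem, hbcnt, hbmax, hbmin⟩ := ih hpw'.1 hM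
      set st := M.foldl pvStepB (none, 0, -1, 0) with hst
      have hpM : p ∈ M := List.mem_of_getLast? hlast
      have hcount_app : ∀ k : Int, (M ++ [x]).count k = M.count k + if k = x then 1 else 0 := by
        intro k
        by_cases h : k = x <;> simp [List.count_append, h, List.count_eq_zero]
      have hlast' : (M ++ [x]).getLast? = some x := by simp
      have hbx : st.2.2.1 ≤ x := hpw'.2 _ hbmem
      by_cases hxp : x = p
      · -- run extends: run' = count p M + 1
        have hrun' : (if st.1 == some x then st.2.1 + 1 else 1) = (M.count p : Int) + 1 := by
          rw [hprev, hxp]; simp [hrun]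
        have hcx : ((M ++ [x]).count x : Int) = (M.count p : Int) + 1 := by
          rw [hcount_app x]; simp [hxp]
        by_cases hgt : (M.count p : Int) + 1 > st.2.2.2
        · have hstep : List.foldl pvStepB st [x]
              = (some x, (M.count p : Int) + 1, x, (M.count p : Int) + 1) := by
            simp only [List.foldl_cons, List.foldl_nil, pvStepB]
            rw [hrun', if_pos hgt]
          rw [hstep]
          refine ⟨x, hlast', rfl, by simpa [hxp] using hcx,
            by show (1:Int) ≤ (M.count p : Int) + 1; omega, by simp,
            by simpa using hcx, ?_, ?_⟩
          · intro k hk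
            rcases List.mem_append.mp hk with h | h
            · rw [hcount_app k]
              by_cases hkx : k = x
              · subst hkx; simp [hxp]
              · have := hbmax k h; simp [hkx]; omega
            · have : k = x := by simpa using h
              subst this; rw [hcx]
          · intro k hk he
            rcases List.mem_append.mp hk with h | h
            · by_cases hkx : k = x
              · exact le_of_eq hkx.symm
              · exfalso
                rw [hcount_app k, if_neg hkx] at he
                have := hbmax k h; push_cast at he; omega
            · have : k = x := by simpa using h
              subst this; exact le_refl _
        · -- run' ≤ bestCnt: best unchanged; note best ≠ x (else its count would now beat bestCnt)
          have hbnex : st.2.2.1 ≠ x := by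
            intro he
            rw [he, hxp] at hbcnt
            omega
          have hstep : List.foldl pvStepB st [x]
              = (some x, (M.count p : Int) + 1, st.2.2.1, st.2.2.2) := by
            simp only [List.foldl_cons, List.foldl_nil, pvStepB]
            rw [hrun', if_neg hgt]
          rw [hstep]
          refine ⟨x, hlast', rfl, by simpa [hxp] using hcx,
            by show (1:Int) ≤ st.2.2.2; omega,
            List.mem_append_left _ hbmem, ?_, ?_, ?_⟩
          · rw [hcount_app, if_neg hbnex]; push_cast; omega
          · intro k hk
            rcases List.mem_append.mp hk with h | h
            · rw [hcount_app k]
              by_cases hkx : k = x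
              · subst hkx; simp [hxp]; omega
              · have := hbmax k h; simp [hkx]; omega
            · have : k = x := by simpa using h
              subst this; rw [hcx]; show (M.count p : Int) + 1 ≤ st.2.2.2; omega
          · intro k hk he
            rcases List.mem_append.mp hk with h | h
            · by_cases hkx : k = x
              · subst hkx; exact hbx
              · rw [hcount_app k, if_neg hkx] at he
                push_cast at he
                exact hbmin k h (by omega)
            · have : k = x := by simpa using h
              subst this; exact hbx
      · -- new value: x ∉ M (it is ≥ the last element p, which bounds all of M), run' = 1 ≤ bestCnt
        have hub : ∀ a ∈ M, a ≤ p := by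
          have hgl : M.getLast hM = p := by
            have h2 := List.getLast?_eq_some_getLast (l := M) hM
            rw [h2] at hlast; exact Option.some.inj hlast
          have hdec : M.dropLast ++ [p] = M := by
            rw [← hgl]; exact List.dropLast_append_getLast hM
          have hpwM := hpw'.1
          rw [← hdec, List.pairwise_append] at hpwM
          intro a ha
          rw [← hdec] at ha
          rcases List.mem_append.mp ha with h | h
          · exact hpwM.2.2 a h p (by simp)
          · have : a = p := by simpa using h
            exact le_of_eq this
        have hxM : x ∉ M := by
          intro hmem
          exact hxp (le_antisymm (hub x hmem) (hpw'.2 p hpM))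
        have hcx0 : M.count x = 0 := List.count_eq_zero.mpr hxM
        have hrun' : (if st.1 == some x then st.2.1 + 1 else 1) = (1 : Int) := by
          rw [hprev]; simp [Ne.symm hxp]
        have hngt : ¬ ((1 : Int) > st.2.2.2) := by omega
        have hbnex : st.2.2.1 ≠ x := fun he => hxM (he ▸ hbmem)
        have hstep : List.foldl pvStepB st [x] = (some x, 1, st.2.2.1, st.2.2.2) := by
          simp only [List.foldl_cons, List.foldl_nil, pvStepB]
          rw [hrun', if_neg hngt]
        rw [hstep]
        refine ⟨x, hlast', rfl, by rw [hcount_app x]; simp [hcx0], hbc1,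
          List.mem_append_left _ hbmem, ?_, ?_, ?_⟩
        · rw [hcount_app, if_neg hbnex]; push_cast; omega
        · intro k hk
          rcases List.mem_append.mp hk with h | h
          · rw [hcount_app k]
            by_cases hkx : k = x
            · subst hkx; exact absurd h hxM
            · have := hbmax k h; simp [hkx]; omega
          · have hkx : k = x := by simpa using h
            rw [hkx, hcount_app x, hcx0, if_pos rfl]
            show ((0 + 1 : Nat) : Int) ≤ st.2.2.2
            push_cast; omega
        · intro k hk he
          rcases List.mem_append.mp hk with h | h
          · by_cases hkx : k = x
            · subst hkx; exact absurd h hxM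
            · rw [hcount_app k, if_neg hkx] at he
              push_cast at he
              exact hbmin k h (by omega)
          · have : k = x := by simpa using h
            subst this; exact hbx

-- ===== VERDICT (by name: the statement is the Claim_ definition above) =====
theorem migratoryBirds_spec : Claim_equal_migratoryBirds := by
  intro arr _
  by_cases harr : arr = []
  · subst harr; unfold Spec_migratoryBirds migratoryBirds migratoryBirds_alt; decide
  unfold Spec_migratoryBirds migratoryBirds migratoryBirds_alt
  set cnt : Int → Int := fun k => (arr.count k : Int) with hcnt
  set L : List Int := PySem.Set.ofList arr with hL
  have hkeys : (PySem.Dict.counter arr).keys = L := PySem.Dict.keys_counter arr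
  have hgetD : ∀ b, (PySem.Dict.counter arr).getD b 0 = cnt b := fun b => PySem.Dict.getD_counter arr b
  have hnil : L ≠ [] := by
    intro h
    cases arr with
    | nil => exact harr rfl
    | cons a t =>
      have : a ∈ L := by rw [hL]; exact (PySem.Set.mem_ofList _ _).mpr List.mem_cons_self
      simp [h] at this
  have hfold :
      L.foldl
        (fun (st : Int × Int) bird =>
          if (PySem.Dict.counter arr).getD bird 0 > st.1 then ((PySem.Dict.counter arr).getD bird 0, bird)
          else if (PySem.Dict.counter arr).getD bird 0 == st.1 then
            (if bird < st.2 then ((PySem.Dict.counter arr).getD bird 0, bird) else st)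
          else st)
        (-1, -1)
      = L.foldl (pvStep cnt) (-1, -1) := by
    apply PySem.List.foldl_congr_mem
    intro acc x _
    simp only [pvStep, hgetD]
  simp only [hkeys, hfold]
  obtain ⟨hmax, hmem, hceq, hmin⟩ := pvGood cnt (fun k => Int.natCast_nonneg _) L hnil
  set r := L.foldl (pvStep cnt) (-1, -1) with hr
  -- B side
  set s : List Int := PySem.List.sorted arr (fun x => x) false with hs
  have hsnil : s ≠ [] := by
    rw [hs, Ne, PySem.List.sorted_eq_nil_iff]; exact harr
  have hspw : s.Pairwise (· ≤ ·) := by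
    have := PySem.List.sorted_pairwise (xs := arr) (key := fun x : Int => x)
    simpa using this
  have hperm : s.Perm arr := PySem.List.sorted_perm arr (fun x => x) false
  have hscount : ∀ k, s.count k = arr.count k := fun k => hperm.count_eq k
  have hsmem : ∀ k, k ∈ s ↔ k ∈ L := by
    intro k
    rw [hL, PySem.Set.mem_ofList]
    exact hperm.mem_iff
  obtain ⟨p, _, _, _, _, hbmem, hbcnt, hbmax, hbmin⟩ := pvGoodB s hspw hsnil
  set st := s.foldl pvStepB (none, 0, -1, 0) with hstd
  -- counts agree: s.count = cnt
  have hc : ∀ k, ((s.count k : Int)) = cnt k := by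
    intro k; rw [hscount k]
  -- the two maxima are equal
  have hmax_eq : r.1 = st.2.2.2 := by
    have h1 : r.1 ≤ st.2.2.2 := by
      have := hbmax r.2 ((hsmem r.2).mpr hmem)
      rw [hc r.2, hceq] at this; exact this
    have h2 : st.2.2.2 ≤ r.1 := by
      have := hmax st.2.2.1 ((hsmem st.2.2.1).mp hbmem)
      rw [← hc st.2.2.1, hbcnt] at this; exact this
    omega
  -- the two minima are equal
  have h1 : r.2 ≤ st.2.2.1 := by
    apply hmin st.2.2.1 ((hsmem st.2.2.1).mp hbmem)
    rw [← hc st.2.2.1, hbcnt, hmax_eq]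
  have h2 : st.2.2.1 ≤ r.2 := by
    apply hbmin r.2 ((hsmem r.2).mpr hmem)
    rw [hc r.2, hceq, hmax_eq]
  omega
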